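-- pv_equiv track=rewrite | github.com/kelvinhuang0327/number-pattern-research | tools/backtest_biglotto_comprehensive.py | strat_markov_single
-- ===== SOURCE A (Python) =====
-- from collections import Counter
--
-- MAX_NUM = 49
--
-- PICK = 6
--
-- def strat_markov_single(history, num_bets=1):
--     """1st-order Markov transition from last draw. Deterministic."""
--     window = min(100, len(history))
--     recent = history[-window:]
--
--     transitions = Counter()
--     for i in range(len(recent) - 1):
--         curr_set = set(recent[i]['numbers'])
--         next_nums = recent[i + 1]['numbers']
--         for c in curr_set:
--             for n in next_nums:
--                 transitions[(c, n)] += 1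
--
--     if not recent:
--         return [sorted(list(range(1, PICK + 1)))]
--
--     last_draw = history[-1]['numbers']
--     next_scores = Counter()
--     for c in last_draw:
--         for n in range(1, MAX_NUM + 1):
--             next_scores[n] += transitions.get((c, n), 0)
--
--     sorted_nums = sorted(range(1, MAX_NUM + 1), key=lambda x: next_scores[x], reverse=True)
--     bets = []
--     for i in range(num_bets):
--         bets.append(sorted(sorted_nums[i * PICK:(i + 1) * PICK]))
--     return bets
-- ===== SOURCE B (Python) =====
-- MAX_NUM = 49
--
-- PICK = 6
--
-- def strat_markov_single(history, num_bets=1):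
--     """Same scoring without the (c, n) transition table: one pass over
--     consecutive draw pairs, weighting each next-draw number by the overlap
--     of the current draw with the last draw."""
--     recent = history[-min(100, len(history)):]
--     if not recent:
--         return [list(range(1, PICK + 1))]
--     last_draw = history[-1]['numbers']
--     scores = {}
--     for curr, nxt in zip(recent, recent[1:]):
--         curr_set = set(curr['numbers'])
--         overlap = len([c for c in last_draw if c in curr_set])
--         for n in nxt['numbers']:
--             scores[n] = scores.get(n, 0) + overlap
--     sorted_nums = sorted(range(1, MAX_NUM + 1), key=lambda x: scores.get(x, 0), reverse=True)
--     return [sorted(sorted_nums[i * PICK:(i + 1) * PICK]) for i in range(num_bets)]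
-- ===== Notes on version B (the rewrite author's own statement) =====
-- stated objective: simpler
-- what changed: Drops the quadratic-size (current,next) transition Counter and the per-number rescoring loop over 1..49: one pass over consecutive draw pairs adds each pair's overlap-with-the-last-draw weight directly to the next draw's numbers, then the same stable descending sort and slicing.
import Mathlib
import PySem

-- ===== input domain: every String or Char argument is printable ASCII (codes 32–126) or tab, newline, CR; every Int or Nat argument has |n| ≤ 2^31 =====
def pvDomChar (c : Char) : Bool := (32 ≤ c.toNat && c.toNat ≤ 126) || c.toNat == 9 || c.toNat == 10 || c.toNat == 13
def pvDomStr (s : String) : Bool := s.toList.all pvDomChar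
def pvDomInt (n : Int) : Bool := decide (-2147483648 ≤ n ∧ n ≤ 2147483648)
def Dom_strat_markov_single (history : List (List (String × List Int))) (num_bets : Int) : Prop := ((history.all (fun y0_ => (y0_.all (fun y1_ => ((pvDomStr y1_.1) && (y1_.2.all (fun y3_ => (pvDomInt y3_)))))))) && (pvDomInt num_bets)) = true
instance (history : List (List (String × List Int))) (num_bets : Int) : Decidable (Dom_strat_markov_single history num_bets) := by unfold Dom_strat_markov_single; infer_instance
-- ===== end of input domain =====

-- B replaces A's (current,next) transition Counter and its per-number rescoring loop over 1..49 by a single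
-- pass over consecutive draw pairs that adds each pair's overlap-with-the-last-draw weight to the next draw's
-- numbers; same stable descending sort and slicing, so the return value is identical on all of Pre_.

-- ===== PORT A =====
-- d['numbers'] (dict lookup, first match per the association-list convention); KeyError is excluded by Pre_,
-- outside Pre_ the port reads [] where Python raises.
def pyNumbers (d : List (String × List Int)) : List Int := (List.lookup "numbers" d).getD []

def strat_markov_single (history : List (List (String × List Int))) (num_bets : Int) : List (List Int) :=
  let window : Int := min 100 (history.length : Int)
  let recent := PySem.List.slice history (some (-window)) none
  let transitions := (PySem.List.pyRange 0 ((recent.length : Int) - 1) 1).foldl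
      (fun t i =>
        let currSet := PySem.Set.ofList (pyNumbers (PySem.List.pyGetD recent i []))
        let nextNums := pyNumbers (PySem.List.pyGetD recent (i + 1) [])
        currSet.foldl (fun t c => nextNums.foldl (fun t n => PySem.Dict.modify t (c, n) 0 (· + 1)) t) t)
      (PySem.Dict.empty : PySem.Dict (Int × Int) Int)
  if recent.isEmpty then
    [PySem.List.sorted (PySem.List.pyRange 1 (6 + 1) 1) (fun x => x) false]
  else
    let last_draw := pyNumbers (PySem.List.pyGetD history (-1) [])
    let next_scores := last_draw.foldl
        (fun s c => (PySem.List.pyRange 1 (49 + 1) 1).foldl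
          (fun s n => PySem.Dict.modify s n 0 (· + PySem.Dict.getD transitions (c, n) 0)) s)
        (PySem.Dict.empty : PySem.Dict Int Int)
    let sorted_nums := PySem.List.sorted (PySem.List.pyRange 1 (49 + 1) 1)
        (fun x => PySem.Dict.getD next_scores x 0) true
    (PySem.List.pyRange 0 num_bets 1).foldl
      (fun bets i =>
        bets ++ [PySem.List.sorted (PySem.List.slice sorted_nums (some (i * 6)) (some ((i + 1) * 6))) (fun x => x) false])
      []

-- ===== PORT B =====
def strat_markov_single_alt (history : List (List (String × List Int))) (num_bets : Int) : List (List Int) :=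
  let recent := PySem.List.slice history (some (-(min 100 (history.length : Int)))) none
  if recent.isEmpty then
    [PySem.List.pyRange 1 (6 + 1) 1]
  else
    let last_draw := pyNumbers (PySem.List.pyGetD history (-1) [])
    let scores := (recent.zip (PySem.List.slice recent (some 1) none)).foldl
        (fun s p =>
          let currSet := PySem.Set.ofList (pyNumbers p.1)
          let overlap : Int := (last_draw.filter (fun c => PySem.Set.contains currSet c)).length
          (pyNumbers p.2).foldl (fun s n => PySem.Dict.modify s n 0 (· + overlap)) s)
        (PySem.Dict.empty : PySem.Dict Int Int)
    let sorted_nums := PySem.List.sorted (PySem.List.pyRange 1 (49 + 1) 1)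
        (fun x => PySem.Dict.getD scores x 0) true
    (PySem.List.pyRange 0 num_bets 1).map
      (fun i => PySem.List.sorted (PySem.List.slice sorted_nums (some (i * 6)) (some ((i + 1) * 6))) (fun x => x) false)

-- ===== PRECONDITION & SPEC =====
-- Pre_ excludes exactly the inputs where A raises KeyError: some draw dict among the ones A reads
-- (the last min(100, len) draws, i.e. history[len-100:]) has no 'numbers' key.
def Pre_strat_markov_single (history : List (List (String × List Int))) (num_bets : Int) : Prop :=
  ∀ d ∈ history.drop (history.length - 100), (List.lookup "numbers" d).isSome = true
instance (history : List (List (String × List Int))) (num_bets : Int) : Decidable (Pre_strat_markov_single history num_bets) := by unfold Pre_strat_markov_single; infer_instance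
def pvWitness_strat_markov_single : (List (List (String × List Int))) × Int :=
  ([[("numbers", [3, 7, 3])], [("numbers", [7, 1])]], 1)

def Spec_strat_markov_single (history : List (List (String × List Int))) (num_bets : Int) (out : List (List Int)) : Prop := out = strat_markov_single_alt history num_bets
instance (history : List (List (String × List Int))) (num_bets : Int) (out : List (List Int)) : Decidable (Spec_strat_markov_single history num_bets out) := by unfold Spec_strat_markov_single; infer_instance

-- ===== CLAIM (what is proved, stated in full; the proofs are below) =====
def Claim_equal_strat_markov_single : Prop := ∀ (history : List (List (String × List Int))) (num_bets : Int), Dom_strat_markov_single history num_bets → Pre_strat_markov_single history num_bets → Spec_strat_markov_single history num_bets (strat_markov_single history num_bets)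

-- ===== LEMMAS AND PROOFS =====

-- an indexed loop over range(len(xs)-1) reading xs[i], xs[i+1] is the loop over consecutive pairs
lemma foldl_range_pairs {α β : Type} (F : α → α → β → β) (d : α) :
    ∀ (xs : List α) (t0 : β),
      (List.range (xs.length - 1)).foldl (fun t k => F (xs.getD k d) (xs.getD (k + 1) d) t) t0
        = (xs.zip xs.tail).foldl (fun t p => F p.1 p.2 t) t0 := by
  intro xs
  induction xs with
  | nil => intro t0; rfl
  | cons x xs ih =>
    intro t0
    cases xs with
    | nil => rfl
    | cons y ys =>
      have h1 : (x :: y :: ys).length - 1 = ys.length + 1 := by simp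
      rw [h1, List.range_succ_eq_map, List.foldl_cons, List.foldl_map]
      have h2 : (y :: ys).length - 1 = ys.length := by simp
      have hih := ih (F x y t0)
      rw [h2] at hih
      simpa [List.getD_cons_succ, Nat.succ_eq_add_one] using hih

-- getD after the innermost A-loop: all keys share the first component c
lemma getD_transFold_inner (ns : List Int) (c : Int) (t : PySem.Dict (Int × Int) Int) (c0 n0 : Int) :
    (ns.foldl (fun t n => PySem.Dict.modify t (c, n) 0 (· + 1)) t).getD (c0, n0) 0
      = t.getD (c0, n0) 0 + if c0 = c then (ns.count n0 : Int) else 0 := by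
  have h : ns.foldl (fun t n => PySem.Dict.modify t (c, n) 0 (· + 1)) t
      = (ns.map (fun n => (c, n))).foldl (fun t k => PySem.Dict.modify t k 0 (· + 1)) t := by
    rw [List.foldl_map]
  rw [h, PySem.Dict.getD_foldl_modify_add_one]
  by_cases hc : c0 = c
  · subst hc
    rw [List.count_map_of_injective ns (fun n => (c0, n)) (fun a b hab => by simpa using hab) n0]
    simp
  · have hz : (ns.map (fun n => (c, n))).count (c0, n0) = 0 := by
      rw [List.count_eq_zero]
      intro hmem
      rcases List.mem_map.mp hmem with ⟨n, -, hpair⟩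
      injection hpair with hc' hn'
      exact hc hc'.symm
    simp [hz, hc]

-- getD after the middle A-loop over the deduplicated current draw
lemma getD_transFold_mid (cs : List Int) (hnd : cs.Nodup) (ns : List Int)
    (t : PySem.Dict (Int × Int) Int) (c0 n0 : Int) :
    (cs.foldl (fun t c => ns.foldl (fun t n => PySem.Dict.modify t (c, n) 0 (· + 1)) t) t).getD (c0, n0) 0
      = t.getD (c0, n0) 0 + if c0 ∈ cs then (ns.count n0 : Int) else 0 := by
  induction cs generalizing t with
  | nil => simp
  | cons a cs ih =>
    rcases List.nodup_cons.mp hnd with ⟨ha, hnd'⟩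
    rw [List.foldl_cons, ih hnd', getD_transFold_inner]
    by_cases h1 : c0 = a
    · subst h1
      simp [ha]
    · simp [h1, List.mem_cons]

-- transitions[(c0, n0)] is the sum over consecutive pairs of [c0 ∈ set(curr)] * count(n0, next)
lemma getD_transFold (ps : List ((List (String × List Int)) × (List (String × List Int))))
    (t : PySem.Dict (Int × Int) Int) (c0 n0 : Int) :
    (ps.foldl
        (fun t p => (PySem.Set.ofList (pyNumbers p.1)).foldl
          (fun t c => (pyNumbers p.2).foldl (fun t n => PySem.Dict.modify t (c, n) 0 (· + 1)) t) t) t).getD (c0, n0) 0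
      = t.getD (c0, n0) 0
        + (ps.map (fun p => (if c0 ∈ pyNumbers p.1 then ((pyNumbers p.2).count n0 : Int) else 0))).sum := by
  induction ps generalizing t with
  | nil => simp
  | cons p ps ih =>
    rw [List.foldl_cons, ih, getD_transFold_mid _ (PySem.Set.nodup_ofList _)]
    simp only [PySem.Set.mem_ofList, List.map_cons, List.sum_cons]
    ring

-- a modify-loop over distinct keys adds f n at key n
lemma getD_modifyFold_nodup (l : List Int) (hnd : l.Nodup) (f : Int → Int)
    (s : PySem.Dict Int Int) (n0 : Int) :
    (l.foldl (fun s n => PySem.Dict.modify s n 0 (· + f n)) s).getD n0 0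
      = s.getD n0 0 + if n0 ∈ l then f n0 else 0 := by
  induction l generalizing s with
  | nil => simp
  | cons a l ih =>
    rcases List.nodup_cons.mp hnd with ⟨ha, hnd'⟩
    rw [List.foldl_cons, ih hnd', PySem.Dict.getD_modify]
    by_cases h1 : n0 = a
    · subst h1
      simp [ha]
    · simp [h1, List.mem_cons, add_comm]

-- a modify-loop adding a constant v adds count * v
lemma getD_modifyFold_const (l : List Int) (v : Int) (s : PySem.Dict Int Int) (n0 : Int) :
    (l.foldl (fun s n => PySem.Dict.modify s n 0 (· + v)) s).getD n0 0
      = s.getD n0 0 + (l.count n0 : Int) * v := by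
  induction l generalizing s with
  | nil => simp
  | cons a l ih =>
    rw [List.foldl_cons, ih, PySem.Dict.getD_modify, List.count_cons]
    by_cases h1 : n0 = a
    · subst h1
      simp
      ring
    · simp [h1]
      exact Or.inl fun h => h1 h.symm

-- exchanging two list sums
lemma sum_sum_comm {α β : Type} (l : List α) (m : List β) (g : α → β → Int) :
    (l.map (fun a => (m.map (fun b => g a b)).sum)).sum
      = (m.map (fun b => (l.map (fun a => g a b)).sum)).sum := by
  induction l with
  | nil => simp
  | cons a l ih =>
    simp only [List.map_cons, List.sum_cons, ih]
    rw [PySem.List.sum_map_add_int]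

-- a 0/K-valued sum is (length of the filtered list) * K
lemma sum_ite_const {α : Type} (P : α → Bool) (K : Int) :
    ∀ l : List α, (l.map (fun a => if P a then K else 0)).sum = ((l.filter P).length : Int) * K := by
  intro l
  induction l with
  | nil => simp
  | cons a l ih =>
    by_cases h : P a
    · simp only [List.map_cons, List.sum_cons, if_pos h, ih, List.filter_cons_of_pos h,
        List.length_cons]
      push_cast
      ring
    · simp [h, ih]

lemma insertBy_congr {α : Type} (b1 b2 : α → α → Bool) (x : α) :
    ∀ (ys : List α), (∀ y ∈ ys, b1 x y = b2 x y) →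
      PySem.List.insertBy b1 x ys = PySem.List.insertBy b2 x ys := by
  intro ys
  induction ys with
  | nil => intro _; rfl
  | cons y ys ih =>
    intro h
    have hy := h y (by simp)
    simp only [PySem.List.insertBy, ← hy]
    by_cases hb : b1 x y
    · simp [hb]
    · simp only [hb, Bool.false_eq_true, if_false]
      exact congrArg (y :: ·) (ih (fun z hz => h z (List.mem_cons_of_mem _ hz)))

lemma foldl_insertBy_congr {α : Type} (b1 b2 : α → α → Bool) :
    ∀ (l acc : List α), (∀ x ∈ l, ∀ y ∈ l, b1 x y = b2 x y) →
      (∀ x ∈ l, ∀ y ∈ acc, b1 x y = b2 x y) →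
      l.foldl (fun acc x => PySem.List.insertBy b1 x acc) acc
        = l.foldl (fun acc x => PySem.List.insertBy b2 x acc) acc := by
  intro l
  induction l with
  | nil => intros; rfl
  | cons x l ih =>
    intro acc hl hacc
    simp only [List.foldl_cons]
    rw [insertBy_congr b1 b2 x acc (fun y hy => hacc x (by simp) y hy)]
    refine ih (PySem.List.insertBy b2 x acc)
      (fun a ha y hy => hl a (by simp [ha]) y (by simp [hy])) ?_
    intro a ha y hy
    rcases (PySem.List.mem_insertBy b2 x y acc).mp hy with h | h
    · exact h ▸ hl a (by simp [ha]) x (by simp)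
    · exact hacc a (by simp [ha]) y h

-- sorted is determined by the key values on the list's elements
lemma sorted_key_congr (xs : List Int) (k1 k2 : Int → Int) (rev : Bool)
    (h : ∀ x ∈ xs, k1 x = k2 x) :
    PySem.List.sorted xs k1 rev = PySem.List.sorted xs k2 rev := by
  cases rev with
  | false =>
    rw [PySem.List.sorted_eq_foldl_insertBy, PySem.List.sorted_eq_foldl_insertBy]
    exact foldl_insertBy_congr _ _ xs []
      (fun a ha y hy => by rw [h a ha, h y hy]) (by simp)
  | true =>
    rw [PySem.List.sorted_rev_eq_foldl_insertBy, PySem.List.sorted_rev_eq_foldl_insertBy]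
    exact foldl_insertBy_congr _ _ xs []
      (fun a ha y hy => by rw [h a ha, h y hy]) (by simp)

lemma range49_nodup : (PySem.List.pyRange 1 (49 + 1) 1).Nodup := by decide

-- one c-step of A's rescoring loop
lemma getD_scoreStep (tr : PySem.Dict (Int × Int) Int) (c : Int) (s : PySem.Dict Int Int) (n0 : Int) :
    ((PySem.List.pyRange 1 (49 + 1) 1).foldl
        (fun s n => PySem.Dict.modify s n 0 (· + tr.getD (c, n) 0)) s).getD n0 0
      = s.getD n0 0 + if n0 ∈ PySem.List.pyRange 1 (49 + 1) 1 then tr.getD (c, n0) 0 else 0 :=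
  getD_modifyFold_nodup _ range49_nodup _ s n0

-- A's rescoring loop sums the transition row over the last draw
lemma getD_scoreFoldA (tr : PySem.Dict (Int × Int) Int) (n0 : Int)
    (hn : n0 ∈ PySem.List.pyRange 1 (49 + 1) 1) :
    ∀ (ld : List Int) (s : PySem.Dict Int Int),
      (ld.foldl
          (fun s c => (PySem.List.pyRange 1 (49 + 1) 1).foldl
            (fun s n => PySem.Dict.modify s n 0 (· + tr.getD (c, n) 0)) s) s).getD n0 0
        = s.getD n0 0 + (ld.map (fun c => tr.getD (c, n0) 0)).sum := by
  intro ld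
  induction ld with
  | nil => simp
  | cons c ld ih =>
    intro s
    rw [List.foldl_cons, ih, getD_scoreStep, if_pos hn]
    simp only [List.map_cons, List.sum_cons]
    ring

-- B's scoring loop sums overlap * multiplicity over the pairs
lemma getD_scoreFoldB (ld : List Int) (n0 : Int) :
    ∀ (ps : List ((List (String × List Int)) × (List (String × List Int)))) (s : PySem.Dict Int Int),
      (ps.foldl
          (fun s p =>
            (pyNumbers p.2).foldl
              (fun s n => PySem.Dict.modify s n 0
                (· + ((ld.filter (fun c => PySem.Set.contains (PySem.Set.ofList (pyNumbers p.1)) c)).length : Int))) s) s).getD n0 0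
        = s.getD n0 0
          + (ps.map (fun p => ((pyNumbers p.2).count n0 : Int)
              * ((ld.filter (fun c => PySem.Set.contains (PySem.Set.ofList (pyNumbers p.1)) c)).length : Int))).sum := by
  intro ps
  induction ps with
  | nil => simp
  | cons p ps ih =>
    intro s
    rw [List.foldl_cons, ih, getD_modifyFold_const]
    simp only [List.map_cons, List.sum_cons]
    ring

-- A's score of n0 equals B's score of n0 for n0 ∈ 1..49
lemma scores_agree (ps : List ((List (String × List Int)) × (List (String × List Int))))
    (ld : List Int) (n0 : Int) (hn : n0 ∈ PySem.List.pyRange 1 (49 + 1) 1) :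
    (ld.foldl
        (fun s c => (PySem.List.pyRange 1 (49 + 1) 1).foldl
          (fun s n => PySem.Dict.modify s n 0
            (· + PySem.Dict.getD
              (ps.foldl
                (fun t p => (PySem.Set.ofList (pyNumbers p.1)).foldl
                  (fun t c => (pyNumbers p.2).foldl (fun t n => PySem.Dict.modify t (c, n) 0 (· + 1)) t) t)
                (PySem.Dict.empty : PySem.Dict (Int × Int) Int)) (c, n) 0)) s)
        (PySem.Dict.empty : PySem.Dict Int Int)).getD n0 0
      = (ps.foldl
          (fun s p =>
            let currSet := PySem.Set.ofList (pyNumbers p.1)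
            let overlap : Int := (ld.filter (fun c => PySem.Set.contains currSet c)).length
            (pyNumbers p.2).foldl (fun s n => PySem.Dict.modify s n 0 (· + overlap)) s)
          (PySem.Dict.empty : PySem.Dict Int Int)).getD n0 0 := by
  show _ = (ps.foldl
      (fun s p =>
        (pyNumbers p.2).foldl
          (fun s n => PySem.Dict.modify s n 0
            (· + ((ld.filter (fun c => PySem.Set.contains (PySem.Set.ofList (pyNumbers p.1)) c)).length : Int))) s)
      (PySem.Dict.empty : PySem.Dict Int Int)).getD n0 0
  rw [getD_scoreFoldA _ _ hn, getD_scoreFoldB]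
  simp only [PySem.Dict.getD_empty, zero_add, getD_transFold]
  rw [sum_sum_comm]
  refine congrArg List.sum (List.map_congr_left ?_)
  intro p _
  have hfilter : (ld.filter (fun c => PySem.Set.contains (PySem.Set.ofList (pyNumbers p.1)) c))
      = ld.filter (fun c => decide (c ∈ pyNumbers p.1)) := by
    apply List.filter_congr
    intro c _
    simp [PySem.Set.contains, PySem.Set.mem_ofList]
  rw [hfilter,
    show (fun c => (if c ∈ pyNumbers p.1 then ((pyNumbers p.2).count n0 : Int) else 0))
      = (fun c => if decide (c ∈ pyNumbers p.1) then ((pyNumbers p.2).count n0 : Int) else 0) from by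
        funext c; by_cases h : c ∈ pyNumbers p.1 <;> simp [h],
    sum_ite_const]
  ring

-- A's transition Counter built by index equals the fold over consecutive pairs
lemma transFold_eq_pairs (r : List (List (String × List Int))) :
    (PySem.List.pyRange 0 ((r.length : Int) - 1) 1).foldl
        (fun t i =>
          (PySem.Set.ofList (pyNumbers (PySem.List.pyGetD r i []))).foldl
            (fun t c => (pyNumbers (PySem.List.pyGetD r (i + 1) [])).foldl
              (fun t n => PySem.Dict.modify t (c, n) 0 (· + 1)) t) t)
        (PySem.Dict.empty : PySem.Dict (Int × Int) Int)
      = (r.zip r.tail).foldl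
          (fun t p =>
            (PySem.Set.ofList (pyNumbers p.1)).foldl
              (fun t c => (pyNumbers p.2).foldl (fun t n => PySem.Dict.modify t (c, n) 0 (· + 1)) t) t)
          (PySem.Dict.empty : PySem.Dict (Int × Int) Int) := by
  rcases r with _ | ⟨x, xs⟩
  · rfl
  · have hlen : ((x :: xs).length : Int) - 1 = ((xs.length : Nat) : Int) := by
      simp
    rw [hlen, PySem.List.pyRange_zero_natCast, List.foldl_map]
    have hlen2 : (x :: xs).length - 1 = xs.length := by simp
    have := foldl_range_pairs
      (fun curr next t =>
        (PySem.Set.ofList (pyNumbers curr)).foldl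
          (fun t c => (pyNumbers next).foldl
            (fun t n => PySem.Dict.modify t (c, n) 0 (· + 1)) t) t)
      ([] : List (String × List Int)) (x :: xs) (PySem.Dict.empty : PySem.Dict (Int × Int) Int)
    rw [hlen2] at this
    have harg : ∀ (k : Nat),
        PySem.List.pyGetD (x :: xs) ((k : Int)) ([] : List (String × List Int)) = (x :: xs).getD k []
        ∧ PySem.List.pyGetD (x :: xs) ((k : Int) + 1) ([] : List (String × List Int)) = (x :: xs).getD (k + 1) [] := by
      intro k
      refine ⟨PySem.List.pyGetD_natCast .., ?_⟩
      rw [show ((k : Int) + 1) = ((k + 1 : Nat) : Int) by push_cast; ring]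
      exact PySem.List.pyGetD_natCast ..
    refine Eq.trans ?_ this
    congr 1
    funext t k
    rw [(harg k).1, (harg k).2]

lemma sorted_slice_congr (SA SB : List Int) (a b : Int) (h : SA = SB) :
    PySem.List.sorted (PySem.List.slice SA (some a) (some b)) (fun x => x) false
      = PySem.List.sorted (PySem.List.slice SB (some a) (some b)) (fun x => x) false := by
  rw [h]

-- ===== VERDICT (by name: the statement is the Claim_ definition above) =====
theorem strat_markov_single_spec : Claim_equal_strat_markov_single := by
  intro history num_bets _ _
  show strat_markov_single history num_bets = strat_markov_single_alt history num_bets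
  simp only [strat_markov_single, strat_markov_single_alt]
  by_cases hemp : (PySem.List.slice history (some (-(min 100 (history.length : Int)))) none).isEmpty = true
  · rw [if_pos hemp, if_pos hemp]
    decide
  · rw [if_neg hemp, if_neg hemp]
    rw [PySem.List.foldl_append_singleton_eq_map, List.nil_append]
    refine List.map_congr_left ?_
    intro i _
    apply sorted_slice_congr _ _ _ _
    apply sorted_key_congr
    intro x hx
    simp only [transFold_eq_pairs]
    rw [PySem.List.slice_from_one]
    exact scores_agree _ _ x hx
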